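-- pv_equiv track=rewrite | github.com/GiacosaM/Automation_marcas | packaging/build_release/MiAppMarcas/app/email_sender.py | determinar_importancia_principal
-- ===== SOURCE A (Python) =====
-- def determinar_importancia_principal(boletines_data):
--     """
--     Determina el nivel de importancia más alto entre los boletines.
--     Prioridad: Alta > Media > Baja
--     """
--     prioridad = {
--         'Alta': 3,
--         'Media': 2,
--         'Baja': 1
--     }
--
--     max_importancia = 'Baja'
--     max_prioridad = -1
--
--     for boletin in boletines_data:
--         importancia = boletin.get('importancia', 'Baja')
--         if importancia in prioridad and prioridad[importancia] > max_prioridad: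
--             max_prioridad = prioridad[importancia]
--             max_importancia = importancia
--
--     return max_importancia
-- ===== SOURCE B (Python) =====
-- def determinar_importancia_principal(boletines_data):
--     present = {b.get('importancia', 'Baja') for b in boletines_data}
--     for nivel in ('Alta', 'Media', 'Baja'):
--         if nivel in present:
--             return nivel
--     return 'Baja'
-- ===== Notes on version B (the rewrite author's own statement) =====
-- stated objective: simpler
-- what changed: Replaces the running-max scan with per-priority state by a set of the distinct importancia values probed in descending priority order with short-circuit return.
import Mathlib
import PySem

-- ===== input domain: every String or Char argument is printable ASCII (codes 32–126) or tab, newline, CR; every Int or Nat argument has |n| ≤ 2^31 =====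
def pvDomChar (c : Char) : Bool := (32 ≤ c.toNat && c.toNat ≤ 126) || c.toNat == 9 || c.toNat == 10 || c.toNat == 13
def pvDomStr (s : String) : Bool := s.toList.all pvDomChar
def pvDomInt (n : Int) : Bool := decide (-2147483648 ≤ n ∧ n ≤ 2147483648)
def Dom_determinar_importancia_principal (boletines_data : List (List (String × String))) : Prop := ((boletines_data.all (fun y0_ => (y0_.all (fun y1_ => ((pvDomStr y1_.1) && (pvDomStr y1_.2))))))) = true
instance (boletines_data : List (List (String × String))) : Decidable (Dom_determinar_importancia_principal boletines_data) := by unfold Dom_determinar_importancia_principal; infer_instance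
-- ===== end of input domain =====

-- B replaces A's running-max scan by a distinct-value set probed in descending priority order (objective: simpler).

-- ===== PORT A =====
-- boletin.get('importancia', 'Baja')
def pvGetImp (b : List (String × String)) : String :=
  (PySem.Dict.mk b).getD "importancia" "Baja"

def pvPrioridad : PySem.Dict String Int :=
  PySem.Dict.mk [("Alta", 3), ("Media", 2), ("Baja", 1)]

-- the body of A's for-loop: updates (max_importancia, max_prioridad)
def pvStepA (st : String × Int) (boletin : List (String × String)) : String × Int :=
  let importancia := pvGetImp boletin
  match pvPrioridad.get? importancia with
  | some p => if p > st.2 then (importancia, p) else st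
  | none => st

def determinar_importancia_principal (boletines_data : List (List (String × String))) : String :=
  (boletines_data.foldl pvStepA ("Baja", -1)).1

-- ===== PORT B =====
def determinar_importancia_principal_alt (boletines_data : List (List (String × String))) : String :=
  let present : PySem.Set String := PySem.Set.ofList (boletines_data.map pvGetImp)
  if PySem.Set.contains present "Alta" then "Alta"
  else if PySem.Set.contains present "Media" then "Media"
  else if PySem.Set.contains present "Baja" then "Baja"
  else "Baja"

-- ===== PRECONDITION & SPEC =====
def Spec_determinar_importancia_principal (boletines_data : List (List (String × String))) (out : String) : Prop := out = determinar_importancia_principal_alt boletines_data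
instance (boletines_data : List (List (String × String))) (out : String) : Decidable (Spec_determinar_importancia_principal boletines_data out) := by unfold Spec_determinar_importancia_principal; infer_instance

-- ===== CLAIM (what is proved, stated in full; the proofs are below) =====
def Claim_equal_determinar_importancia_principal : Prop := ∀ (boletines_data : List (List (String × String))), Dom_determinar_importancia_principal boletines_data → Spec_determinar_importancia_principal boletines_data (determinar_importancia_principal boletines_data)

-- ===== LEMMAS AND PROOFS =====

-- the four states A's loop can ever be in
def pvOkState (st : String × Int) : Prop :=
  st = ("Baja", -1) ∨ st = ("Baja", 1) ∨ st = ("Media", 2) ∨ st = ("Alta", 3)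

set_option maxRecDepth 4096 in
lemma pvPrio_get (v : String) : pvPrioridad.get? v =
    (if v = "Alta" then some 3 else if v = "Media" then some 2
     else if v = "Baja" then some (1 : Int) else none) := by
  show (PySem.Dict.mk [("Alta", 3), ("Media", 2), ("Baja", 1)]).get? v = _
  rw [PySem.Dict.get?_mk_cons, PySem.Dict.get?_mk_cons, PySem.Dict.get?_mk_cons]
  simp only [PySem.Dict.get?, List.find?, beq_iff_eq, Option.map]
  by_cases h1 : v = "Alta" <;> by_cases h2 : v = "Media" <;> by_cases h3 : v = "Baja" <;>
    simp_all [eq_comm]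

set_option maxHeartbeats 1000000 in
set_option maxRecDepth 4096 in
lemma pvFoldA_char (bs : List (List (String × String))) :
    ∀ st : String × Int, pvOkState st →
    (bs.foldl pvStepA st).1 =
      (if "Alta" ∈ bs.map pvGetImp ∨ st.1 = "Alta" then "Alta"
       else if "Media" ∈ bs.map pvGetImp ∨ st.1 = "Media" then "Media"
       else "Baja") := by
  induction bs with
  | nil =>
    intro st hst
    rcases hst with h | h | h | h <;> subst h <;> simp
  | cons b rest ih =>
    intro st hst
    have hstep : pvOkState (pvStepA st b) ∧
        ((pvStepA st b).1 = "Alta" ↔ pvGetImp b = "Alta" ∨ st.1 = "Alta") ∧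
        ((pvStepA st b).1 = "Media" ↔ (pvGetImp b = "Media" ∧ st.1 ≠ "Alta") ∨
            (st.1 = "Media" ∧ pvGetImp b ≠ "Alta")) := by
      rcases hst with h | h | h | h <;> subst h <;>
        by_cases h1 : pvGetImp b = "Alta" <;>
        by_cases h2 : pvGetImp b = "Media" <;>
        by_cases h3 : pvGetImp b = "Baja" <;>
        simp_all [pvStepA, pvPrio_get, pvOkState]
    rw [List.foldl_cons, ih _ hstep.1]
    rcases hstep with ⟨-, hA, hM⟩
    by_cases h1 : pvGetImp b = "Alta" <;>
      by_cases h2 : pvGetImp b = "Media" <;>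
      by_cases h3 : st.1 = "Alta" <;>
      by_cases h4 : st.1 = "Media" <;>
      simp_all <;> simp [Ne.symm h1, Ne.symm h2]

lemma pvAlt_char (bs : List (List (String × String))) :
    determinar_importancia_principal_alt bs =
      (if "Alta" ∈ bs.map pvGetImp then "Alta"
       else if "Media" ∈ bs.map pvGetImp then "Media"
       else "Baja") := by
  simp only [determinar_importancia_principal_alt]
  by_cases hA : "Alta" ∈ bs.map pvGetImp <;>
    by_cases hM : "Media" ∈ bs.map pvGetImp <;>
    by_cases hB : "Baja" ∈ bs.map pvGetImp <;>
    simp [PySem.Set.contains, PySem.Set.mem_ofList, hA, hM, hB]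

-- ===== VERDICT (by name: the statement is the Claim_ definition above) =====
theorem determinar_importancia_principal_spec : Claim_equal_determinar_importancia_principal := by
  intro bs _
  show determinar_importancia_principal bs = determinar_importancia_principal_alt bs
  rw [determinar_importancia_principal,
    pvFoldA_char bs ("Baja", -1) (Or.inl rfl), pvAlt_char]
  simp
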